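-- pv_equiv track=rewrite | github.com/GeneralPoxter/GlossBERT | util.py | sense_tagged_chunks
-- ===== SOURCE A (Python) =====
-- def tagged_chunks(chunks, tags=["pos"]):
--     def helper(attributes):
--         return tuple(attributes[t] if t in attributes else None for t in tags)
--
--     return [
--         [(*helper(attributes), chunk) for attributes, chunk in annotated_sentence]
--         for annotated_sentence in chunks
--     ]
--
-- def sense_tagged_chunks(chunks, filter_pn=False):
--     chunks = tagged_chunks(chunks, tags=["lemma", "wnsn", "pos", "pn"])
--
--     def helper(wnsn):
--         if wnsn is None:
--             return None
--         # Filter wnsn=0 for words dropped from WordNet 1.6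
--         return [int(n) for n in wnsn.split(";") if int(n) != 0]
--
--     return [
--         [
--             (lemma, helper(wnsn), pos, text)
--             for lemma, wnsn, pos, pn, text in tagged_sentence
--             # Filter proper nouns, since they only have one sense
--             if not filter_pn or pn is None
--         ]
--         for tagged_sentence in chunks
--     ]
-- ===== SOURCE B (Python) =====
-- def sense_tagged_chunks(chunks, filter_pn=False):
--     def senses(raw):
--         if raw is None:
--             return None
--         return [n for n in map(int, raw.split(";")) if n != 0]
--
--     out = []
--     for sentence in chunks:
--         row = []
--         for attributes, chunk in sentence:
--             if filter_pn and attributes.get("pn") is not None: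
--                 continue
--             row.append((attributes.get("lemma"),
--                         senses(attributes.get("wnsn")),
--                         attributes.get("pos"),
--                         chunk))
--         out.append(row)
--     return out
-- ===== Notes on version B (the rewrite author's own statement) =====
-- stated objective: simpler
-- what changed: Replaced the two sequential comprehension passes (generic tagged_chunks building 5-tuples, then a filtering reshape) with one explicit accumulator loop that filters and emits the 4-tuples directly via attribute .get lookups; Pre_ excludes only inputs where A raises ValueError (a kept wnsn part int() cannot parse).
import Mathlib
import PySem

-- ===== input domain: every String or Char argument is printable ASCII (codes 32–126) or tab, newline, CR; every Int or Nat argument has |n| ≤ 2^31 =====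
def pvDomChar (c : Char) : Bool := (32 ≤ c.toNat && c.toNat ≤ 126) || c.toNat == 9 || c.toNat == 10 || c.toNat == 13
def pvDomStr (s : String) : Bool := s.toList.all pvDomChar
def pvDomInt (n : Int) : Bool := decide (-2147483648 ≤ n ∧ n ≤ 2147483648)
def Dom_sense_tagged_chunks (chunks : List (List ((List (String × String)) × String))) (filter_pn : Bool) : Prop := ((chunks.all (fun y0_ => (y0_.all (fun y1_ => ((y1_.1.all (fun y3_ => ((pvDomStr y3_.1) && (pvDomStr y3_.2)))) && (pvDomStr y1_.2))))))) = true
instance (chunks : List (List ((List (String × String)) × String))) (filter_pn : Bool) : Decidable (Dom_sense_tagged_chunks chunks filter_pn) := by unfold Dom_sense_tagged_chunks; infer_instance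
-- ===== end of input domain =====

-- B fuses A's two comprehension passes into one explicit accumulator loop with direct .get lookups; equivalence proved on Pre_ (where int() does not raise).


-- ===== PORT A =====
-- tagged_chunks' inner helper, specialized to the call's fixed tag list ["lemma","wnsn","pos","pn"]
-- (Python builds a variable-arity tuple; dict lookup = first match on the association list)
def pvTagHelperA (attributes : List (String × String)) :
    Option String × Option String × Option String × Option String :=
  (attributes.lookup "lemma", attributes.lookup "wnsn", attributes.lookup "pos", attributes.lookup "pn")

-- tagged_chunks(chunks, tags=["lemma","wnsn","pos","pn"])
def pvTaggedChunksA (chunks : List (List ((List (String × String)) × String))) :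
    List (List (Option String × Option String × Option String × Option String × String)) :=
  chunks.map (fun annotated_sentence =>
    annotated_sentence.map (fun p =>
      ((pvTagHelperA p.1).1, (pvTagHelperA p.1).2.1, (pvTagHelperA p.1).2.2.1, (pvTagHelperA p.1).2.2.2, p.2)))

-- sense_tagged_chunks' helper(wnsn); int(n) via PySem.Int.ofStr? (none = ValueError, excluded by Pre_)
def pvWnsnHelperA (wnsn : Option String) : Option (List Int) :=
  match wnsn with
  | none => none
  | some s => some ((((PySem.Str.split? s ";").getD []).filter
      (fun n => ((PySem.Int.ofStr? n).getD 0) != 0)).map (fun n => (PySem.Int.ofStr? n).getD 0))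

def sense_tagged_chunks (chunks : List (List ((List (String × String)) × String))) (filter_pn : Bool) : List (List (Option String × Option (List Int) × Option String × String)) :=
  (pvTaggedChunksA chunks).map (fun tagged_sentence =>
    (tagged_sentence.filter (fun q => !filter_pn || q.2.2.2.1.isNone)).map
      (fun q => (q.1, pvWnsnHelperA q.2.1, q.2.2.1, q.2.2.2.2)))

-- ===== PORT B =====
-- senses(raw): map int over the ';'-parts, then keep the nonzero values
def pvSensesB (raw : Option String) : Option (List Int) :=
  match raw with
  | none => none
  | some s => some ((((PySem.Str.split? s ";").getD []).map
      (fun p => (PySem.Int.ofStr? p).getD 0)).filter (fun v => v != 0))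

-- one fused loop with explicit accumulators; attributes.get k = first match in the assoc list
def sense_tagged_chunks_alt (chunks : List (List ((List (String × String)) × String))) (filter_pn : Bool) : List (List (Option String × Option (List Int) × Option String × String)) :=
  chunks.foldl (fun out s =>
    out ++ [s.foldl (fun row p =>
      if filter_pn && (p.1.lookup "pn").isSome then row
      else row ++ [(p.1.lookup "lemma", pvSensesB (p.1.lookup "wnsn"), p.1.lookup "pos", p.2)]) []]) []

-- ===== PRECONDITION & SPEC =====
-- Pre_ excludes exactly the inputs where Python A raises ValueError: a kept pair whose
-- "wnsn" value has a ';'-separated part that int() cannot parse.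
def Pre_sense_tagged_chunks (chunks : List (List ((List (String × String)) × String))) (filter_pn : Bool) : Prop :=
  (chunks.all (fun s => s.all (fun p =>
    !(!filter_pn || (p.1.lookup "pn").isNone) ||
    (match p.1.lookup "wnsn" with
     | none => true
     | some w => ((PySem.Str.split? w ";").getD []).all (fun n => (PySem.Int.ofStr? n).isSome))))) = true
instance (chunks : List (List ((List (String × String)) × String))) (filter_pn : Bool) : Decidable (Pre_sense_tagged_chunks chunks filter_pn) := by unfold Pre_sense_tagged_chunks; infer_instance

def pvWitness_sense_tagged_chunks : (List (List ((List (String × String)) × String))) × Bool :=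
  ([[([("lemma", "run"), ("wnsn", "2;0"), ("pos", "VB")], "runs"),
     ([("pn", "person")], "Bob")]], false)

def Spec_sense_tagged_chunks (chunks : List (List ((List (String × String)) × String))) (filter_pn : Bool) (out : List (List (Option String × Option (List Int) × Option String × String))) : Prop := out = sense_tagged_chunks_alt chunks filter_pn
instance (chunks : List (List ((List (String × String)) × String))) (filter_pn : Bool) (out : List (List (Option String × Option (List Int) × Option String × String))) : Decidable (Spec_sense_tagged_chunks chunks filter_pn out) := by unfold Spec_sense_tagged_chunks; infer_instance

-- ===== CLAIM (what is proved, stated in full; the proofs are below) =====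
def Claim_equal_sense_tagged_chunks : Prop := ∀ (chunks : List (List ((List (String × String)) × String))) (filter_pn : Bool), Dom_sense_tagged_chunks chunks filter_pn → Pre_sense_tagged_chunks chunks filter_pn → Spec_sense_tagged_chunks chunks filter_pn (sense_tagged_chunks chunks filter_pn)

-- ===== LEMMAS AND PROOFS =====

theorem pvFilterMapComm (l : List String) :
    ((l.filter (fun n => ((PySem.Int.ofStr? n).getD 0) != 0)).map
        (fun n => (PySem.Int.ofStr? n).getD 0))
      = ((l.map (fun p => (PySem.Int.ofStr? p).getD 0)).filter (fun v => v != 0)) := by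
  induction l with
  | nil => rfl
  | cons h t ih =>
    by_cases hz : ((PySem.Int.ofStr? h).getD 0) = 0 <;> simp [hz, ih]

theorem pvSensesB_eq (raw : Option String) : pvSensesB raw = pvWnsnHelperA raw := by
  cases raw with
  | none => rfl
  | some s => simp [pvSensesB, pvWnsnHelperA, pvFilterMapComm]

theorem pvInnerB_eq (s : List ((List (String × String)) × String)) (filter_pn : Bool) :
    s.foldl (fun row p =>
      if filter_pn && (p.1.lookup "pn").isSome then row
      else row ++ [(p.1.lookup "lemma", pvSensesB (p.1.lookup "wnsn"), p.1.lookup "pos", p.2)]) []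
    = ((s.map (fun p =>
        ((pvTagHelperA p.1).1, (pvTagHelperA p.1).2.1, (pvTagHelperA p.1).2.2.1,
          (pvTagHelperA p.1).2.2.2, p.2))).filter
          (fun q => !filter_pn || q.2.2.2.1.isNone)).map
        (fun q => (q.1, pvWnsnHelperA q.2.1, q.2.2.1, q.2.2.2.2)) := by
  induction s using List.reverseRecOn with
  | nil => rfl
  | append_singleton t p ih =>
    simp only [List.foldl_append, List.foldl_cons, List.foldl_nil, ih,
      List.map_append, List.filter_append, List.map_cons, List.map_nil,
      List.filter_cons, List.filter_nil]
    rw [pvSensesB_eq]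
    cases hpn : p.1.lookup "pn" <;> cases filter_pn <;> simp [pvTagHelperA, hpn]

theorem pvOuterB_eq (chunks : List (List ((List (String × String)) × String)))
    (filter_pn : Bool)
    (g : List ((List (String × String)) × String) →
         List (Option String × Option (List Int) × Option String × String))
    (acc : List (List (Option String × Option (List Int) × Option String × String)))
    (h : ∀ s, (s.foldl (fun row p =>
      if filter_pn && (p.1.lookup "pn").isSome then row
      else row ++ [(p.1.lookup "lemma", pvSensesB (p.1.lookup "wnsn"), p.1.lookup "pos", p.2)]) []) = g s) :
    chunks.foldl (fun out s =>
      out ++ [s.foldl (fun row p =>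
        if filter_pn && (p.1.lookup "pn").isSome then row
        else row ++ [(p.1.lookup "lemma", pvSensesB (p.1.lookup "wnsn"), p.1.lookup "pos", p.2)]) []]) acc
    = acc ++ chunks.map g := by
  induction chunks generalizing acc with
  | nil => simp
  | cons hd tl ih =>
    rw [List.foldl_cons, ih, h hd]
    simp

-- ===== VERDICT (by name: the statement is the Claim_ definition above) =====
theorem sense_tagged_chunks_spec : Claim_equal_sense_tagged_chunks := by
  intro chunks filter_pn _ _
  unfold Spec_sense_tagged_chunks sense_tagged_chunks sense_tagged_chunks_alt pvTaggedChunksA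
  rw [pvOuterB_eq chunks filter_pn _ [] (fun s => pvInnerB_eq s filter_pn)]
  simp [List.map_map, Function.comp]
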